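-- pv_equiv track=rewrite | github.com/kopeadri/BPMN-Models | getting_relations.py | get_start_and_ends_events
-- ===== SOURCE A (Python) =====
-- def get_start_and_ends_events(in_log_matrix):
--   start_set = []
--   end_set = []
--   for log_array in in_log_matrix:
--     if log_array[0] not in start_set:
--       start_set.append(log_array[0])
--     if log_array[-1] not in end_set:
--       end_set.append(log_array[-1])
--   return start_set,end_set
-- ===== SOURCE B (Python) =====
-- def _nub(xs):
--     # delete-duplicates-of-head dedup: take the front element, drop all of its
--     # later copies from the remaining list, repeat; no membership test against
--     # the output is ever made.
--     out = []
--     while xs: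
--         head = xs[0]
--         out.append(head)
--         xs = [x for x in xs[1:] if x != head]
--     return out
--
-- def get_start_and_ends_events(in_log_matrix):
--     return (_nub([row[0] for row in in_log_matrix]),
--             _nub([row[-1] for row in in_log_matrix]))
-- ===== Notes on version B (the rewrite author's own statement) =====
-- stated objective: alternative
-- what changed: Collects firsts and lasts in two separate map passes, then deduplicates each by repeatedly extracting the front element and filtering all its remaining copies out of the rest of the list, instead of A's single interleaved loop that tests membership in the growing output lists.
import Mathlib
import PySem

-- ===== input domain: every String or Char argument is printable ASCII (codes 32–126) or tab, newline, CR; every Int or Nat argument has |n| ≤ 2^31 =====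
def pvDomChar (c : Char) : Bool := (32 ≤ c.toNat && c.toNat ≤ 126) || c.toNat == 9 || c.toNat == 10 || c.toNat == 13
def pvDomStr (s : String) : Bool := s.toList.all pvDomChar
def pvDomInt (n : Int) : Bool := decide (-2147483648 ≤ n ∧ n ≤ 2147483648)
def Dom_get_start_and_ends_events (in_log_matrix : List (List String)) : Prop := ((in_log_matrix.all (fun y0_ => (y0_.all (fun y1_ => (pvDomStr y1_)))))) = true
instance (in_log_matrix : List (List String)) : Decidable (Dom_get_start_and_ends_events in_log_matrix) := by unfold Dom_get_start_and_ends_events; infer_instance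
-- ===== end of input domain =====

-- B collects firsts/lasts in two map passes and deduplicates each by repeatedly taking the
-- front element and filtering its remaining copies out of the rest, instead of A's single
-- loop testing membership in the growing output lists (objective: alternative decomposition).
-- ===== PORT A =====
def get_start_and_ends_events (in_log_matrix : List (List String)) : List String × List String :=
  in_log_matrix.foldl
    (fun (acc : List String × List String) log_array =>
      let s := if acc.1.contains ((PySem.List.pyGet? log_array 0).getD "") then acc.1
               else acc.1 ++ [(PySem.List.pyGet? log_array 0).getD ""]
      let e := if acc.2.contains ((PySem.List.pyGet? log_array (-1)).getD "") then acc.2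
               else acc.2 ++ [(PySem.List.pyGet? log_array (-1)).getD ""]
      (s, e))
    ([], [])

-- ===== PORT B =====
-- Source B's _nub: pop the head, append it to out, filter its copies from the remainder.
def pvNub (out xs : List String) : List String :=
  match xs with
  | [] => out
  | h :: t => pvNub (out ++ [h]) (t.filter (fun x => x ≠ h))
termination_by xs.length
decreasing_by
  simpa using le_trans (List.length_filter_le _ t.attach) (Nat.le_of_eq t.length_attach)

def get_start_and_ends_events_alt (in_log_matrix : List (List String)) : List String × List String :=
  let firsts := in_log_matrix.map (fun row => (PySem.List.pyGet? row 0).getD "")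
  let lasts := in_log_matrix.map (fun row => (PySem.List.pyGet? row (-1)).getD "")
  (pvNub [] firsts, pvNub [] lasts)

-- ===== PRECONDITION & SPEC =====
-- Pre_ excludes matrices containing an empty row: there Python A raises IndexError (row[0]).
def Pre_get_start_and_ends_events (in_log_matrix : List (List String)) : Prop :=
  ∀ row ∈ in_log_matrix, row ≠ []
instance (in_log_matrix : List (List String)) : Decidable (Pre_get_start_and_ends_events in_log_matrix) := by
  unfold Pre_get_start_and_ends_events; infer_instance
def pvWitness_get_start_and_ends_events : List (List String) := [["a", "b"], ["a", "c"]]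
def Spec_get_start_and_ends_events (in_log_matrix : List (List String)) (out : List String × List String) : Prop := out = get_start_and_ends_events_alt in_log_matrix
instance (in_log_matrix : List (List String)) (out : List String × List String) : Decidable (Spec_get_start_and_ends_events in_log_matrix out) := by unfold Spec_get_start_and_ends_events; infer_instance

-- ===== CLAIM (what is proved, stated in full; the proofs are below) =====
def Claim_equal_get_start_and_ends_events : Prop := ∀ (in_log_matrix : List (List String)), Dom_get_start_and_ends_events in_log_matrix → Pre_get_start_and_ends_events in_log_matrix → Spec_get_start_and_ends_events in_log_matrix (get_start_and_ends_events in_log_matrix)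

-- ===== LEMMAS AND PROOFS =====

-- A's pair-state fold splits into two independent ordered-set folds over the mapped lists.
theorem pv_fold_split (f g : List String → String) (m : List (List String))
    (s e : List String) :
    m.foldl
      (fun (acc : List String × List String) row =>
        (PySem.Set.add acc.1 (f row), PySem.Set.add acc.2 (g row))) (s, e)
      = ((m.map f).foldl PySem.Set.add s, (m.map g).foldl PySem.Set.add e) := by
  induction m generalizing s e with
  | nil => rfl
  | cons r rs ih => simp [List.foldl_cons, ih]

-- The membership-accumulating fold equals the filter-out nub started from the same prefix:
-- elements already in acc never get appended, which is what pre-filtering them away does.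
theorem pv_fold_eq_nub (xs : List String) : ∀ (acc : List String),
    xs.foldl PySem.Set.add acc = pvNub acc (xs.filter (fun x => !acc.contains x)) := by
  induction xs with
  | nil => intro acc; rw [List.filter_nil, pvNub, List.foldl_nil]
  | cons h t ih =>
    intro acc
    by_cases hm : h ∈ acc
    · have hc : acc.contains h = true := by simpa using hm
      simp only [List.foldl_cons, List.filter_cons, PySem.Set.add, hc, Bool.not_true]
      simpa [hm] using ih acc
    · have hc : acc.contains h = false := by simpa using hm
      have hfil : (t.filter (fun x => !acc.contains x)).filter (fun x => x ≠ h)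
          = t.filter (fun x => !(acc ++ [h]).contains x) := by
        rw [List.filter_filter]
        apply List.filter_congr
        intro x _
        by_cases hx : x = h <;> simp [hx, hm]
      rw [List.foldl_cons, List.filter_cons]
      simp only [hc, Bool.not_false, if_pos]
      rw [pvNub, hfil, ← ih (acc ++ [h])]
      simp [PySem.Set.add, hm]

-- ===== VERDICT (by name: the statement is the Claim_ definition above) =====
theorem get_start_and_ends_events_spec : Claim_equal_get_start_and_ends_events := by
  intro m _ _
  unfold Spec_get_start_and_ends_events get_start_and_ends_events get_start_and_ends_events_alt
  rw [show (fun (acc : List String × List String) (log_array : List String) =>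
      let s := if acc.1.contains ((PySem.List.pyGet? log_array 0).getD "") then acc.1
               else acc.1 ++ [(PySem.List.pyGet? log_array 0).getD ""]
      let e := if acc.2.contains ((PySem.List.pyGet? log_array (-1)).getD "") then acc.2
               else acc.2 ++ [(PySem.List.pyGet? log_array (-1)).getD ""]
      (s, e)) = (fun (acc : List String × List String) row =>
        (PySem.Set.add acc.1 ((PySem.List.pyGet? row 0).getD ""),
         PySem.Set.add acc.2 ((PySem.List.pyGet? row (-1)).getD ""))) from rfl]
  rw [pv_fold_split, pv_fold_eq_nub, pv_fold_eq_nub]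
  simp
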